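-- pv_equiv track=rewrite | github.com/Awesome20225266/Operation-Intelligence | store_data_table_duckdb.py | _find_date_column
-- ===== SOURCE A (Python) =====
-- from typing import Any, Dict, Iterable, List, Optional, Sequence, Tuple
--
-- def _find_date_column(columns: Sequence[str]) -> Optional[str]:
--     for c in columns:
--         if str(c).strip().lower() == "date":
--             return c
--     # fallback contains date
--     for c in columns:
--         if "date" in str(c).strip().lower():
--             return c
--     return None
-- ===== SOURCE B (Python) =====
-- def _find_date_column(columns):
--     fallback = None
--     for c in columns:
--         norm = str(c).strip().lower()
--         if norm == "date":
--             return c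
--         if fallback is None and "date" in norm:
--             fallback = c
--     return fallback
-- ===== Notes on version B (the rewrite author's own statement) =====
-- stated objective: simpler
-- what changed: Two sequential scans (exact match, then substring fallback) are fused into one pass that normalizes each column once and remembers the first substring candidate, returning immediately on an exact match.
import Mathlib
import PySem

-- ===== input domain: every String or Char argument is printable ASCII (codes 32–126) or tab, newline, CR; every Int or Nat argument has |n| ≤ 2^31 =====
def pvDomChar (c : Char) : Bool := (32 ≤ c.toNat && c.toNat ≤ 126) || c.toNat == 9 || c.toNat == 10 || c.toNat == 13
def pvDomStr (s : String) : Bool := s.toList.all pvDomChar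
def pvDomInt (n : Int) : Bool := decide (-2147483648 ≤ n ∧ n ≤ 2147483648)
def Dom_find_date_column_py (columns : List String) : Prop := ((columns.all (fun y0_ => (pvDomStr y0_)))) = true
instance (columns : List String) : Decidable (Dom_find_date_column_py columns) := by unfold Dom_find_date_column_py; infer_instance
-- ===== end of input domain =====

-- B fuses A's two scans into one pass: each column is normalized once, an exact "date" match
-- returns immediately, and the first substring candidate is remembered as a fallback (simpler/one pass).

-- ===== PORT A =====
-- first loop of A: first column whose stripped+lowered form equals "date"
def pvAExact : List String → Option String
  | [] => none
  | c :: rest =>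
      if PySem.Str.lower (PySem.Str.strip c) == "date" then some c else pvAExact rest

-- second loop of A: first column whose stripped+lowered form contains "date"
def pvASub : List String → Option String
  | [] => none
  | c :: rest =>
      if PySem.Str.isIn "date" (PySem.Str.lower (PySem.Str.strip c)) then some c else pvASub rest

def find_date_column_py (columns : List String) : Option String :=
  match pvAExact columns with
  | some c => some c
  | none => pvASub columns

-- ===== PORT B =====
-- single pass carrying the fallback candidate
def pvBGo : List String → Option String → Option String
  | [], fb => fb
  | c :: rest, fb =>
      let norm := PySem.Str.lower (PySem.Str.strip c)
      if norm == "date" then some c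
      else pvBGo rest (if fb.isNone && PySem.Str.isIn "date" norm then some c else fb)

def find_date_column_py_alt (columns : List String) : Option String :=
  pvBGo columns none

-- ===== PRECONDITION & SPEC =====
def Spec_find_date_column_py (columns : List String) (out : Option String) : Prop := out = find_date_column_py_alt columns
instance (columns : List String) (out : Option String) : Decidable (Spec_find_date_column_py columns out) := by unfold Spec_find_date_column_py; infer_instance

-- ===== CLAIM (what is proved, stated in full; the proofs are below) =====
def Claim_equal_find_date_column_py : Prop := ∀ (columns : List String), Dom_find_date_column_py columns → Spec_find_date_column_py columns (find_date_column_py columns)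

-- ===== LEMMAS AND PROOFS =====
theorem pvBGo_eq (l : List String) : ∀ fb : Option String,
    pvBGo l fb = match pvAExact l with
      | some c => some c
      | none => (match fb with | some f => some f | none => pvASub l) := by
  induction l with
  | nil => intro fb; cases fb <;> simp [pvBGo, pvAExact, pvASub]
  | cons c rest ih =>
    intro fb
    by_cases hx : PySem.Str.lower (PySem.Str.strip c) == "date"
    · simp [pvBGo, pvAExact, hx]
    · by_cases hs : PySem.Str.isIn "date" (PySem.Str.lower (PySem.Str.strip c))
      · cases fb <;> simp [pvBGo, pvAExact, pvASub, hx, hs, ih] <;>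
          cases pvAExact rest <;> simp_all [PySem.Str.isIn]
      · cases fb <;> simp [pvBGo, pvAExact, pvASub, hx, hs, ih] <;>
          cases pvAExact rest <;> simp_all [PySem.Str.isIn]

-- ===== VERDICT (by name: the statement is the Claim_ definition above) =====
theorem find_date_column_py_spec : Claim_equal_find_date_column_py := by
  intro columns _
  unfold Spec_find_date_column_py find_date_column_py find_date_column_py_alt
  rw [pvBGo_eq]
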